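-- pv_equiv track=rewrite | github.com/Arunava800/DSA_MachineLearning | DataStructures/IntroductionToRecursion/Assignments/Check AB.py | helper
-- ===== SOURCE A (Python) =====
-- def helper(s):
--     if len(s) == 0:
--         return True
--     if s[0] == 'a':
--         if len(s[1:]) > 1 and s[1:3] == 'bb':
--             return helper(s[3:])
--         else:
--             return helper(s[1:])
--     else:
--         return False
-- ===== SOURCE B (Python) =====
-- def helper(s):
--     i, n = 0, len(s)
--     while i < n:
--         if s[i] != 'a':
--             return False
--         if s[i+1:i+3] == 'bb':
--             i += 3
--         else:
--             i += 1
--     return True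
-- ===== Notes on version B (the rewrite author's own statement) =====
-- stated objective: faster
-- what changed: replaces the recursive slicing (each call copies the remaining suffix) with a single iterative index scan over the string, no slicing of the tail and no recursion
import Mathlib
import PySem

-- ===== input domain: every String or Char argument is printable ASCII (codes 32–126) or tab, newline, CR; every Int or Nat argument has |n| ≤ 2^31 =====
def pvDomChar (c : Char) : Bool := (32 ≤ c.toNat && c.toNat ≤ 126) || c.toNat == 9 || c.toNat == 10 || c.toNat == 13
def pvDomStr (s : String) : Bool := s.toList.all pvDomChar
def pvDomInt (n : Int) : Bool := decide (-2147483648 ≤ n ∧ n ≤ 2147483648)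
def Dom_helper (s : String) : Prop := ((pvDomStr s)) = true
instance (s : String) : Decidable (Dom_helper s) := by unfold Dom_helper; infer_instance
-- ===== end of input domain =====

-- B replaces A's recursive suffix slicing with a single left-to-right scan that never
-- re-slices the remaining string as a whole.

-- ===== PORT A =====
-- A: recursive; strips 'abb' when the two chars after the leading 'a' are "bb", else strips 'a'.
def helper (s : String) : Bool :=
  if PySem.Str.len s = 0 then true
  else if PySem.Str.pyGet? s 0 = some 'a' then
    if 1 < PySem.Str.len (PySem.Str.slice s (some 1) none)
        ∧ PySem.Str.slice s (some 1) (some 3) = "bb" then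
      helper (PySem.Str.slice s (some 3) none)
    else
      helper (PySem.Str.slice s (some 1) none)
  else false
termination_by s.toList.length
decreasing_by
  all_goals
    have hlen : ¬ (PySem.Str.len s = 0) := by assumption
    simp only [PySem.Str.len_eq, String.length_toList] at hlen
    simp [PySem.List.slice_from]
    omega

-- ===== PORT B =====
-- B: the while loop ('if s[i] != 'a': return False; if s[i+1:i+3] == 'bb': i += 3 else i += 1')
-- transcribed as a tail recursion over the not-yet-scanned characters.
def helperAltScan (cs : List Char) : Bool :=
  match cs with
  | [] => true
  | c :: rest =>
    if c ≠ 'a' then false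
    else if rest.take 2 = ['b', 'b'] then helperAltScan (rest.drop 2)
    else helperAltScan rest
termination_by cs.length
decreasing_by
  all_goals simp only [List.length_drop, List.length_cons]; omega

def helper_alt (s : String) : Bool := helperAltScan s.toList

-- ===== PRECONDITION & SPEC =====
def Spec_helper (s : String) (out : Bool) : Prop := out = helper_alt s
instance (s : String) (out : Bool) : Decidable (Spec_helper s out) := by unfold Spec_helper; infer_instance

-- ===== CLAIM (what is proved, stated in full; the proofs are below) =====
def Claim_equal_helper : Prop := ∀ (s : String), Dom_helper s → Spec_helper s (helper s)

-- ===== LEMMAS AND PROOFS =====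

theorem helper_eq_scan (n : Nat) (s : String) (h : s.toList.length ≤ n) :
    helper s = helperAltScan s.toList := by
  induction n generalizing s with
  | zero =>
    have hnil : s.toList = [] := List.eq_nil_of_length_eq_zero (by omega)
    rw [helper, helperAltScan.eq_def]
    simp [PySem.Str.len_eq, hnil]
  | succ n ih =>
    rw [helper]
    rcases hcs : s.toList with _ | ⟨c, rest⟩
    · rw [helperAltScan.eq_def]
      simp [PySem.Str.len_eq, hcs]
    · have hne : ¬ PySem.Str.len s = 0 := by
        simp only [PySem.Str.len_eq, hcs, List.length_cons]
        intro hx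
        omega
      have hget : PySem.Str.pyGet? s 0 = some c := by
        simp [hcs]
      have h1 : (PySem.Str.slice s (some 1) none).toList = rest := by
        simp [PySem.List.slice_from, hcs]
      have h13 : (PySem.Str.slice s (some 1) (some 3)).toList = rest.take 2 := by
        simp [PySem.List.slice_toNat, hcs]
      have h3 : (PySem.Str.slice s (some 3) none).toList = rest.drop 2 := by
        simp [PySem.List.slice_from, hcs]
      have hrlen : rest.length ≤ n := by
        have : s.toList.length = rest.length + 1 := by rw [hcs]; simp
        omega
      rw [if_neg hne]
      by_cases hc : c = 'a'
      · subst hc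
        rw [if_pos hget]
        by_cases hbb : rest.take 2 = ['b', 'b']
        · have hlen2 : 2 ≤ rest.length := by
            by_contra hlt
            have : (rest.take 2).length = rest.length := by
              rw [List.length_take]; omega
            rw [hbb] at this
            simp at this
            omega
          have hcond : (1 < PySem.Str.len (PySem.Str.slice s (some 1) none)
              ∧ PySem.Str.slice s (some 1) (some 3) = "bb") := by
            constructor
            · simp only [PySem.Str.len_eq, h1]
              exact_mod_cast hlen2
            · have heq : (PySem.Str.slice s (some 1) (some 3)).toList = "bb".toList := by
                rw [h13, hbb]; rfl
              exact String.toList_inj.mp heq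
          rw [if_pos hcond]
          have hdrop : (rest.drop 2).length ≤ n := by
            have := List.length_drop (l := rest) (i := 2); omega
          rw [ih _ (by rw [h3]; exact hdrop), h3]
          conv_rhs => rw [helperAltScan.eq_def]
          simp [hbb]
        · have hcond : ¬ (1 < PySem.Str.len (PySem.Str.slice s (some 1) none)
              ∧ PySem.Str.slice s (some 1) (some 3) = "bb") := by
            rintro ⟨hl, heq⟩
            apply hbb
            rw [← h13, heq]
            simp only [PySem.Str.len_eq, h1] at hl
            rfl
          rw [if_neg hcond]
          rw [ih _ (by rw [h1]; exact hrlen), h1]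
          conv_rhs => rw [helperAltScan.eq_def]
          simp [hbb]
      · rw [if_neg (by rw [hget]; simpa using hc)]
        conv_rhs => rw [helperAltScan.eq_def]
        simp [hc]

-- ===== VERDICT (by name: the statement is the Claim_ definition above) =====
theorem helper_spec : Claim_equal_helper := by
  intro s _
  unfold Spec_helper helper_alt
  exact helper_eq_scan s.toList.length s le_rfl
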